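-- pv_equiv track=rewrite | github.com/pelavarre/xshverb | bin/xshverb.py | str_textify
-- ===== SOURCE A (Python) =====
-- import textwrap
--
-- def str_textify(text: str) -> str:
--     """Keep the Text, but drop the enclosing Blanks"""
--
--     dedent = textwrap.dedent(text)
--     splitlines = dedent.splitlines()
--     rstrips = list(_.rstrip() for _ in splitlines)
--
--     while rstrips and not rstrips[0]:
--         rstrips.pop(0)
--     while rstrips and not rstrips[-1]:
--         rstrips.pop()
--
--     join = "\n".join(rstrips)
--     join_plus = (join + "\n") if join else ""
--
--     return join_plus
-- ===== SOURCE B (Python) =====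
-- import textwrap
--
--
-- def str_textify(text: str) -> str:
--     """Keep the Text, but drop the enclosing Blanks"""
--
--     out = ""
--     pending = ""
--     for raw in textwrap.dedent(text).splitlines():
--         line = raw.rstrip()
--         if line:
--             out += pending + line + "\n"
--             pending = ""
--         elif out:
--             pending += "\n"
--
--     return out
-- ===== Notes on version B (the rewrite author's own statement) =====
-- stated objective: simpler
-- what changed: A builds the full rstripped-line list, runs two while-loops popping blank lines off its front and back (pop(0) shifts the list), then '\n'.joins and appends a newline; B makes one pass over the lines with an output string and a pending-blank-lines accumulator, so leading blanks are skipped, interior blanks are flushed before the next kept line, trailing blanks are never emitted, and no list is built or mutated.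
import Mathlib
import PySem

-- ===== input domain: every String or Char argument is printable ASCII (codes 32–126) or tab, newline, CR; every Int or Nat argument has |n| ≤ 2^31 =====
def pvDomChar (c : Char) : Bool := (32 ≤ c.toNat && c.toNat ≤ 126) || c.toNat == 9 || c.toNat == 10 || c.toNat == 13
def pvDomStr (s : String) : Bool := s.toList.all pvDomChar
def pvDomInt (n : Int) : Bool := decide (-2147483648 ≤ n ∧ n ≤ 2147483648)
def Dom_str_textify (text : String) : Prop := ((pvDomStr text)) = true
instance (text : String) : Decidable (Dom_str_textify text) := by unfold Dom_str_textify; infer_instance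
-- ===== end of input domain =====

-- B replaces A's staged passes (build the rstripped-line list, pop blanks off both ends,
-- '\n'.join, append '\n') by ONE pass over the lines with an output/pending-blanks
-- accumulator (objective: simpler decomposition; same asymptotic cost).

-- ===== PORT A =====
-- A-side helper: port of textwrap.dedent (CPython 3.11), the stdlib call A makes.
-- Whitespace-only lines are emptied (the `_whitespace_only_re.sub('', text)` step), the
-- common leading [ \t] prefix (the margin) of the remaining lines is removed.
def pvIsWsTab (c : Char) : Bool := c == ' ' || c == '\t'

-- the `for i,(x,y) in enumerate(zip(margin, indent))` mismatch cut: longest common prefix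
def pvCommonPrefix : List Char → List Char → List Char
  | x :: xs, y :: ys => if x == y then x :: pvCommonPrefix xs ys else []
  | _, _ => []

-- the `for indent in indents:` margin loop of textwrap.dedent
def pvMargin : Option (List Char) → List (List Char) → Option (List Char)
  | m, [] => m
  | none, ind :: rest => pvMargin (some ind) rest
  | some mg, ind :: rest =>
      if mg.isPrefixOf ind then pvMargin (some mg) rest
      else if ind.isPrefixOf mg then pvMargin (some ind) rest
      else pvMargin (some (pvCommonPrefix mg ind)) rest

def pvDedent (cs : List Char) : List Char :=
  let lines := PySem.Chars.splitOn cs ['\n']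
  -- `_whitespace_only_re.sub('', text)`: a nonempty all-[ \t] line becomes empty
  let lines1 := lines.map (fun l => if !l.isEmpty && l.all pvIsWsTab then [] else l)
  -- `_leading_whitespace_re.findall(text)`: leading [ \t]* of every line with a non-[ \t] char
  let indents := (lines1.filter (fun l => !l.all pvIsWsTab)).map (List.takeWhile pvIsWsTab)
  let margin := pvMargin none indents
  -- `if margin: text = re.sub(r'(?m)^' + margin, '', text)`
  let lines2 := match margin with
    | some mg =>
        if !mg.isEmpty then
          lines1.map (fun l => if mg.isPrefixOf l then l.drop mg.length else l)
        else lines1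
    | none => lines1
  PySem.Chars.join ['\n'] lines2

-- `while rstrips and not rstrips[0]: rstrips.pop(0)`
def pvPopFront : List (List Char) → List (List Char)
  | [] => []
  | s :: rest => if s.isEmpty then pvPopFront rest else s :: rest

-- `while rstrips and not rstrips[-1]: rstrips.pop()` — the same loop run on the reversed list
def pvPopBack (l : List (List Char)) : List (List Char) :=
  (pvPopFront l.reverse).reverse

def str_textify (text : String) : String :=
  let dedent := pvDedent text.toList
  let splitlines := PySem.Chars.splitlines dedent
  let rstrips := splitlines.map PySem.Chars.rstrip
  let popped := pvPopBack (pvPopFront rstrips)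
  let join := PySem.Chars.join ['\n'] popped
  String.ofList (if join.isEmpty then [] else join ++ ['\n'])

-- ===== PORT B =====
-- B-side port of the SAME stdlib call textwrap.dedent, written in B's own combinator style
-- (List.splitOn / filterMap / a foldl margin / List.intercalate); exact to CPython's dedent.
def pvLcp (a b : List Char) : List Char :=
  ((a.zip b).takeWhile (fun p => p.1 == p.2)).map Prod.fst

def pvMarginStep (m : Option (List Char)) (ind : List Char) : Option (List Char) :=
  match m with
  | none => some ind
  | some mg =>
      if mg.isPrefixOf ind then m
      else if ind.isPrefixOf mg then some ind
      else some (pvLcp mg ind)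

def pvDedentB (cs : List Char) : List Char :=
  let ls := (cs.splitOn '\n').map (fun l => if l.all pvIsWsTab then [] else l)
  let margin := (ls.filterMap
      (fun l => if l.all pvIsWsTab then none else some (l.takeWhile pvIsWsTab))).foldl pvMarginStep none
  List.intercalate ['\n']
    (match margin with
      | some mg =>
          if mg = [] then ls
          else ls.map (fun l => if mg.isPrefixOf l then l.drop mg.length else l)
      | none => ls)

-- the loop body: `line = raw.rstrip(); if line: out += pending+line+'\n'; pending = ''
--                 elif out: pending += '\n'`  with state (out, pending)
def pvStep (st : List Char × List Char) (raw : List Char) : List Char × List Char :=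
  let line := PySem.Chars.rstrip raw
  if !line.isEmpty then (st.1 ++ st.2 ++ line ++ ['\n'], [])
  else if !st.1.isEmpty then (st.1, st.2 ++ ['\n'])
  else st

def str_textify_alt (text : String) : String :=
  String.ofList
    ((PySem.Chars.splitlines (pvDedentB text.toList)).foldl pvStep ([], [])).1

-- ===== PRECONDITION & SPEC =====
def Spec_str_textify (text : String) (out : String) : Prop := out = str_textify_alt text
instance (text : String) (out : String) : Decidable (Spec_str_textify text out) := by unfold Spec_str_textify; infer_instance

-- ===== CLAIM (what is proved, stated in full; the proofs are below) =====
def Claim_equal_str_textify : Prop := ∀ (text : String), Dom_str_textify text → Spec_str_textify text (str_textify text)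

-- ===== LEMMAS AND PROOFS =====

-- every kept line followed by one newline
def pvEmit (P : List (List Char)) : List Char := P.flatMap (fun l => l ++ ['\n'])

-- the loop body on an already-rstripped line (pvStep with the rstrip factored out by List.foldl_map)
def pvStep' (st : List Char × List Char) (line : List Char) : List Char × List Char :=
  if !line.isEmpty then (st.1 ++ st.2 ++ line ++ ['\n'], [])
  else if !st.1.isEmpty then (st.1, st.2 ++ ['\n'])
  else st

theorem pvPopFront_eq_dropWhile (L : List (List Char)) :
    pvPopFront L = L.dropWhile List.isEmpty := by
  induction L with
  | nil => rfl
  | cons s rest ih =>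
      cases s with
      | nil => exact ih
      | cons c cs => rfl

theorem pvGoSplit : ∀ (l cur : List Char) (acc : List (List Char)) (fuel : Nat),
    l.length < fuel →
    PySem.Chars.splitOn.go ['\n'] fuel l cur acc =
      acc.reverse ++ (List.splitOnP (fun c => c == '\n') l).modifyHead (fun h => cur.reverse ++ h) := by
  intro l
  induction l with
  | nil =>
      intro cur acc fuel hf
      cases fuel with
      | zero => omega
      | succ f => simp [PySem.Chars.splitOn.go, List.splitOnP_nil]
  | cons c rest ih =>
      intro cur acc fuel hf
      cases fuel with
      | zero => omega
      | succ f =>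
          rw [PySem.Chars.splitOn.go]
          by_cases hc : c = '\n'
          · rw [if_pos (by simp [hc, List.isPrefixOf])]
            rw [show List.drop ['\n'].length (c :: rest) = rest from by simp]
            rw [ih [] (cur.reverse :: acc) f (by simp at hf; omega)]
            rw [List.splitOnP_cons, if_pos (by simp [hc])]
            rcases hsp : List.splitOnP (fun c => c == '\n') rest with _ | ⟨a, t⟩
            · exact absurd hsp (List.splitOnP_ne_nil _ _)
            · simp
          · rw [if_neg (by simp [List.isPrefixOf, hc]; exact fun h => hc h.symm)]
            rw [ih (c :: cur) acc f (by simp at hf; omega)]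
            rw [List.splitOnP_cons, if_neg (by simp [hc])]
            rw [List.modifyHead_modifyHead]
            congr 2
            funext h
            simp
theorem pvSplit_eq (cs : List Char) :
    PySem.Chars.splitOn cs ['\n'] = cs.splitOn '\n' := by
  rw [PySem.Chars.splitOn, pvGoSplit cs [] [] (cs.length + 1) (by omega)]
  rcases hsp : List.splitOnP (fun c => c == '\n') cs with _ | ⟨a, t⟩
  · exact absurd hsp (List.splitOnP_ne_nil _ _)
  · simp [List.splitOn, hsp]
theorem pvJoin_eq_intercalate (L : List (List Char)) :
    PySem.Chars.join ['\n'] L = List.intercalate ['\n'] L := by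
  induction L with
  | nil => simp [PySem.Chars.join_nil, List.intercalate]
  | cons x xs ih =>
      cases xs with
      | nil => simp [PySem.Chars.join_singleton, List.intercalate]
      | cons y ys =>
          rw [PySem.Chars.join_cons_cons, ih]
          simp [List.intercalate, List.intersperse]
theorem pvLcp_eq : ∀ (a b : List Char), pvCommonPrefix a b = pvLcp a b := by
  intro a
  induction a with
  | nil => intro b; cases b <;> rfl
  | cons x xs ih =>
      intro b
      cases b with
      | nil => rfl
      | cons y ys =>
          by_cases hxy : x = y
          · rw [show pvCommonPrefix (x :: xs) (y :: ys) = x :: pvCommonPrefix xs ys from by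
              simp [pvCommonPrefix, hxy], ih ys]
            simp [pvLcp, List.takeWhile, hxy]
          · rw [show pvCommonPrefix (x :: xs) (y :: ys) = [] from by simp [pvCommonPrefix, hxy]]
            simp [pvLcp, List.takeWhile, hxy]
theorem pvMargin_eq_foldl : ∀ (inds : List (List Char)) (m : Option (List Char)),
    pvMargin m inds = inds.foldl pvMarginStep m := by
  intro inds
  induction inds with
  | nil => intro m; cases m <;> rfl
  | cons ind rest ih =>
      intro m
      cases m with
      | none => rw [show pvMargin none (ind :: rest) = pvMargin (some ind) rest from rfl, ih]; rfl
      | some mg =>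
          rw [List.foldl_cons, ← ih]
          show pvMargin (some mg) (ind :: rest) = pvMargin (pvMarginStep (some mg) ind) rest
          by_cases h1 : mg.isPrefixOf ind
          · rw [show pvMarginStep (some mg) ind = some mg from by simp [pvMarginStep, h1]]
            simp [pvMargin, h1]
          · by_cases h2 : ind.isPrefixOf mg
            · rw [show pvMarginStep (some mg) ind = some ind from by simp [pvMarginStep, h1, h2]]
              simp [pvMargin, h1, h2]
            · rw [show pvMarginStep (some mg) ind = some (pvLcp mg ind) from by
                simp [pvMarginStep, h1, h2]]
              simp [pvMargin, h1, h2, pvLcp_eq]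
theorem pvFilterMap_if {α β : Type} (p : α → Bool) (f : α → β) (l : List α) :
    l.filterMap (fun x => if p x then none else some (f x))
      = (l.filter (fun x => !p x)).map f := by
  induction l with
  | nil => rfl
  | cons x xs ih =>
      by_cases hx : p x
      · simp [List.filterMap_cons, List.filter_cons, hx, ih]
      · simp [List.filterMap_cons, List.filter_cons, hx, ih]
theorem pvNorm_eq :
    (fun l : List Char => if l.all pvIsWsTab then [] else l)
      = (fun l => if !l.isEmpty && l.all pvIsWsTab then [] else l) := by
  funext l
  cases l with
  | nil => rfl
  | cons c cs => simp
theorem pvDedentB_eq (cs : List Char) : pvDedentB cs = pvDedent cs := by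
  simp only [pvDedentB, pvDedent]
  rw [← pvSplit_eq, pvNorm_eq]
  rw [pvFilterMap_if (fun l : List Char => l.all pvIsWsTab) (fun l => l.takeWhile pvIsWsTab)]
  rw [← pvMargin_eq_foldl, ← pvJoin_eq_intercalate]
  generalize pvMargin none _ = m
  rcases m with _ | (_ | ⟨c, mg⟩)
  · rfl
  · rfl
  · rfl
theorem pvPopBack_cons_not_all (l : List Char) (rest : List (List Char))
    (h : ¬ rest.all List.isEmpty = true) :
    pvPopBack (l :: rest) = l :: pvPopBack rest := by
  unfold pvPopBack
  rw [pvPopFront_eq_dropWhile, pvPopFront_eq_dropWhile, List.reverse_cons, List.dropWhile_append]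
  have hne : ¬ (rest.reverse.dropWhile List.isEmpty).isEmpty = true := by
    rw [List.isEmpty_iff, List.dropWhile_eq_nil_iff]
    intro hall
    apply h
    rw [List.all_eq_true]
    intro x hx
    exact hall x (List.mem_reverse.2 hx)
  rw [if_neg hne]
  simp
theorem pvPopBack_cons_all (l : List Char) (rest : List (List Char))
    (hl : l ≠ []) (h : rest.all List.isEmpty) :
    pvPopBack (l :: rest) = [l] := by
  unfold pvPopBack
  rw [pvPopFront_eq_dropWhile, List.reverse_cons, List.dropWhile_append]
  have he : (rest.reverse.dropWhile List.isEmpty).isEmpty = true := by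
    rw [List.isEmpty_iff, List.dropWhile_eq_nil_iff]
    intro x hx
    simpa using List.all_eq_true.1 h x (List.mem_reverse.1 hx)
  rw [if_pos he]
  cases l with
  | nil => exact absurd rfl hl
  | cons c cs => simp [List.dropWhile]
theorem pvFold_skip_blanks (M : List (List Char)) :
    M.foldl pvStep' ([], []) = (M.dropWhile List.isEmpty).foldl pvStep' ([], []) := by
  induction M with
  | nil => rfl
  | cons l rest ih =>
      cases hl : l.isEmpty with
      | true =>
          rw [List.foldl_cons, show pvStep' ([], []) l = ([], []) from by
            simp [pvStep', hl], List.dropWhile_cons_of_pos hl]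
          exact ih
      | false => rw [List.dropWhile_cons_of_neg (by simp [hl])]
theorem pvFold_body : ∀ (M : List (List Char)) (out pending : List Char), out ≠ [] →
    (M.foldl pvStep' (out, pending)).1 =
      out ++ (if M.all List.isEmpty then [] else pending ++ pvEmit (pvPopBack M)) := by
  intro M
  induction M with
  | nil => intro out pending h; simp
  | cons l rest ih =>
      intro out pending hout
      cases hl : l.isEmpty with
      | false =>
          rw [List.foldl_cons, show pvStep' (out, pending) l
              = (out ++ pending ++ l ++ ['\n'], []) from by simp [pvStep', hl]]
          rw [ih _ _ (by simp)]
          by_cases hr : rest.all List.isEmpty = true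
          · rw [if_pos hr, if_neg (by simp [hl]),
              pvPopBack_cons_all l rest (by simpa [List.isEmpty_iff] using hl) hr]
            simp [pvEmit]
          · rw [if_neg hr, if_neg (by simp [hl]), pvPopBack_cons_not_all l rest hr]
            simp [pvEmit]
      | true =>
          have hlnil : l = [] := List.isEmpty_iff.1 hl
          rw [List.foldl_cons, show pvStep' (out, pending) l
              = (out, pending ++ ['\n']) from by
            simp [pvStep', hl, List.isEmpty_iff.2, hout]]
          rw [ih _ _ hout]
          by_cases hr : rest.all List.isEmpty = true
          · rw [if_pos hr, if_pos (by simp [hl, hr])]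
          · rw [if_neg hr, if_neg (by simp [hr]), pvPopBack_cons_not_all l rest hr]
            simp [pvEmit, hlnil]
theorem pvFold_main (M : List (List Char)) :
    (M.foldl pvStep' ([], [])).1 = pvEmit (pvPopBack (M.dropWhile List.isEmpty)) := by
  rw [pvFold_skip_blanks]
  cases hD : M.dropWhile List.isEmpty with
  | nil => simp [pvEmit, pvPopBack, pvPopFront]
  | cons l rest =>
      have hl : l.isEmpty = false := by
        have := List.head_dropWhile_not List.isEmpty (l := M) (by simp [hD])
        simpa [hD] using this
      rw [List.foldl_cons, show pvStep' ([], []) l = (l ++ ['\n'], []) from by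
        simp [pvStep', hl]]
      rw [pvFold_body _ _ _ (by simp [List.isEmpty_iff] at hl; simp [hl])]
      by_cases hr : rest.all List.isEmpty = true
      · rw [if_pos hr, pvPopBack_cons_all l rest (by simpa [List.isEmpty_iff] using hl) hr]
        simp [pvEmit]
      · rw [if_neg hr, pvPopBack_cons_not_all l rest hr]
        simp [pvEmit]
theorem pvEmit_eq_join (P : List (List Char)) (h : P ≠ []) :
    pvEmit P = PySem.Chars.join ['\n'] P ++ ['\n'] := by
  induction P with
  | nil => exact absurd rfl h
  | cons x xs ih =>
      cases xs with
      | nil => simp [pvEmit, PySem.Chars.join_singleton]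
      | cons y ys =>
          rw [PySem.Chars.join_cons_cons, show pvEmit (x :: y :: ys)
              = x ++ ['\n'] ++ pvEmit (y :: ys) from by simp [pvEmit], ih (by simp)]
          simp
theorem pvJoin_ne_nil (P : List (List Char)) (h : P ≠ []) (hl : P.getLast h ≠ []) :
    PySem.Chars.join ['\n'] P ≠ [] := by
  induction P with
  | nil => exact absurd rfl h
  | cons x xs ih =>
      cases xs with
      | nil => simpa [PySem.Chars.join_singleton] using hl
      | cons y ys =>
          rw [PySem.Chars.join_cons_cons]
          simp
theorem pvPopBack_getLast (L : List (List Char)) (h : pvPopBack L ≠ []) :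
    (pvPopBack L).getLast h ≠ [] := by
  unfold pvPopBack at h ⊢
  simp only [pvPopFront_eq_dropWhile] at h ⊢
  rw [List.getLast_reverse]
  have hne : List.dropWhile List.isEmpty L.reverse ≠ [] := by
    intro hx; rw [hx] at h; exact h rfl
  have := List.head_dropWhile_not List.isEmpty (l := L.reverse) hne
  simpa [List.isEmpty_iff] using this
theorem pvA_char (M : List (List Char)) :
    (let popped := pvPopBack (pvPopFront M)
     let join := PySem.Chars.join ['\n'] popped
     if join.isEmpty then ([] : List Char) else join ++ ['\n'])
    = pvEmit (pvPopBack (M.dropWhile List.isEmpty)) := by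
  simp only [pvPopFront_eq_dropWhile]
  by_cases hP : pvPopBack (M.dropWhile List.isEmpty) = []
  · rw [hP]; simp [pvEmit, PySem.Chars.join_nil]
  · have hlast := pvPopBack_getLast (M.dropWhile List.isEmpty) hP
    have hjoin := pvJoin_ne_nil _ hP hlast
    simp only [List.isEmpty_iff]
    rw [if_neg hjoin, pvEmit_eq_join _ hP]

-- ===== VERDICT (by name: the statement is the Claim_ definition above) =====
theorem str_textify_spec : Claim_equal_str_textify := by
  intro text _
  unfold Spec_str_textify str_textify str_textify_alt
  rw [pvDedentB_eq]
  rw [show (PySem.Chars.splitlines (pvDedent text.toList)).foldl pvStep ([], [])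
        = ((PySem.Chars.splitlines (pvDedent text.toList)).map PySem.Chars.rstrip).foldl
            pvStep' ([], []) from by
      rw [List.foldl_map]; rfl]
  rw [pvFold_main, ← pvA_char]
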